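-- pv_equiv track=rewrite | github.com/pypi-data/pypi-mirror-99 | packages/scilib/scilib-0.0.13.tar.gz/scilib-0.0.13/scilib/antv/sankey.py | make_blance_analytics
-- ===== SOURCE A (Python) =====
-- def make_blance_analytics(nodes, edges):
--     edges_unique = [edge for edge in edges if edge[0] != edge[1]]
--     values = []
--     for node in nodes:
--         in_value = len([True for a, b in edges_unique if b == node])
--         out_value = len([True for a, b in edges_unique if a == node])
--         value = in_value - out_value
--         values.append(dict(
--             name=node,
--             in_value=in_value,
--             out_value=out_value,
--             value=value,
--         ))
--     return values
-- ===== SOURCE B (Python) =====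
-- def make_blance_analytics(nodes, edges):
--     ins = {}
--     outs = {}
--     for a, b in edges:
--         if a != b:
--             outs[a] = outs.get(a, 0) + 1
--             ins[b] = ins.get(b, 0) + 1
--     return [
--         dict(
--             name=n,
--             in_value=ins.get(n, 0),
--             out_value=outs.get(n, 0),
--             value=ins.get(n, 0) - outs.get(n, 0),
--         )
--         for n in nodes
--     ]
-- ===== Notes on version B (the rewrite author's own statement) =====
-- stated objective: faster
-- what changed: B replaces A's per-node rescans of the edge list with one pass over the edges building in-/out-degree counter dicts, then a constant-time lookup per node.
import Mathlib
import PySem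

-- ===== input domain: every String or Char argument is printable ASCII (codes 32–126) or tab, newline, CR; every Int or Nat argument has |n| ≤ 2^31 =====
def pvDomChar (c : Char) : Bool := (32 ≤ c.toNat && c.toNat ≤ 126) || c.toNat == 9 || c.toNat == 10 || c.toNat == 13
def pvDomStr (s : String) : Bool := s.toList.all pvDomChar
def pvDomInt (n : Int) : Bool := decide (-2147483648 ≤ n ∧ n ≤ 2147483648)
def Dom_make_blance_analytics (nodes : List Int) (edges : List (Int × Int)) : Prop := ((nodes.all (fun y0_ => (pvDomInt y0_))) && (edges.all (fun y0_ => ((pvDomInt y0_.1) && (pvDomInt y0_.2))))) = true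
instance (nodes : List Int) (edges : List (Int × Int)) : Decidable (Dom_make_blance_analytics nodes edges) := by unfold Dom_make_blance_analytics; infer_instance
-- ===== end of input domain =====

-- B builds in-/out-degree counter dicts in one pass over the edges instead of rescanning
-- the edge list for every node (objective: faster, O(N+E) vs O(N*E)).

-- ===== PORT A =====
def make_blance_analytics (nodes : List Int) (edges : List (Int × Int)) : List (List (String × Int)) :=
  let edges_unique := edges.filter (fun edge => edge.1 != edge.2)
  nodes.foldl (fun values node =>
    let in_value : Int := ((edges_unique.filter (fun p => p.2 == node)).length : Int)
    let out_value : Int := ((edges_unique.filter (fun p => p.1 == node)).length : Int)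
    let value := in_value - out_value
    values ++ [[("name", node), ("in_value", in_value), ("out_value", out_value), ("value", value)]]) []

-- ===== PORT B =====
def make_blance_analytics_alt (nodes : List Int) (edges : List (Int × Int)) : List (List (String × Int)) :=
  let st := edges.foldl
    (fun (st : PySem.Dict Int Int × PySem.Dict Int Int) e =>
      if e.1 != e.2 then
        (st.1.insert e.2 (st.1.getD e.2 0 + 1), st.2.insert e.1 (st.2.getD e.1 0 + 1))
      else st)
    (PySem.Dict.empty, PySem.Dict.empty)
  nodes.map (fun n =>
    [("name", n), ("in_value", st.1.getD n 0), ("out_value", st.2.getD n 0),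
     ("value", st.1.getD n 0 - st.2.getD n 0)])

-- ===== PRECONDITION & SPEC =====
def Spec_make_blance_analytics (nodes : List Int) (edges : List (Int × Int)) (out : List (List (String × Int))) : Prop := out = make_blance_analytics_alt nodes edges
instance (nodes : List Int) (edges : List (Int × Int)) (out : List (List (String × Int))) : Decidable (Spec_make_blance_analytics nodes edges out) := by unfold Spec_make_blance_analytics; infer_instance

-- ===== CLAIM (what is proved, stated in full; the proofs are below) =====
def Claim_equal_make_blance_analytics : Prop := ∀ (nodes : List Int) (edges : List (Int × Int)), Dom_make_blance_analytics nodes edges → Spec_make_blance_analytics nodes edges (make_blance_analytics nodes edges)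

-- ===== LEMMAS AND PROOFS =====

-- B's one loop over the edges updates the two counter dicts independently: split it.
theorem pv_foldl_pair_split (l : List (Int × Int)) (i o : PySem.Dict Int Int) :
    l.foldl (fun st e =>
        if e.1 != e.2 then
          (st.1.insert e.2 (st.1.getD e.2 0 + 1), st.2.insert e.1 (st.2.getD e.1 0 + 1))
        else st) (i, o)
      = (l.foldl (fun d e => if e.1 != e.2 then d.insert e.2 (d.getD e.2 0 + 1) else d) i,
         l.foldl (fun d e => if e.1 != e.2 then d.insert e.1 (d.getD e.1 0 + 1) else d) o) := by
  induction l generalizing i o with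
  | nil => rfl
  | cons h t ih =>
    simp only [List.foldl_cons]
    by_cases hp : (h.1 != h.2) = true
    · rw [if_pos hp, if_pos hp, if_pos hp]; exact ih _ _
    · rw [if_neg hp, if_neg hp, if_neg hp]; exact ih _ _

-- lookup in a counter built over keys (proj x) counts the projections
theorem pv_getD_counter_proj (l : List (Int × Int)) (proj : Int × Int → Int) (n : Int)
    (d : PySem.Dict Int Int) :
    (l.foldl (fun (d : PySem.Dict Int Int) e => d.insert (proj e) (d.getD (proj e) 0 + 1))
        d).getD n 0 = d.getD n 0 + (l.countP (fun e => proj e == n) : Int) := by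
  induction l generalizing d with
  | nil => simp
  | cons h t ih =>
    rw [List.foldl_cons, ih, List.countP_cons]
    by_cases hn : proj h = n
    · simp [hn]; ring
    · rw [PySem.Dict.getD_insert, if_neg (fun hnn => hn hnn.symm)]
      simp [hn]

theorem pv_filter_len_eq_count (l : List (Int × Int)) (proj : Int × Int → Int) (n : Int) :
    (l.filter (fun p => proj p == n)).length = l.countP (fun p => proj p == n) := by
  simp [List.countP_eq_length_filter]

-- ===== VERDICT (by name: the statement is the Claim_ definition above) =====
theorem make_blance_analytics_spec : Claim_equal_make_blance_analytics := by
  intro nodes edges _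
  unfold Spec_make_blance_analytics make_blance_analytics make_blance_analytics_alt
  dsimp only
  rw [pv_foldl_pair_split, PySem.List.foldl_append_singleton_eq_map]
  simp only [List.nil_append]
  apply List.map_congr_left
  intro n _
  rw [PySem.List.foldl_if_eq_foldl_filter, PySem.List.foldl_if_eq_foldl_filter,
      pv_getD_counter_proj _ (·.2), pv_getD_counter_proj _ (·.1),
      pv_filter_len_eq_count _ (·.2), pv_filter_len_eq_count _ (·.1)]
  simp
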